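-- pv_equiv track=rewrite | github.com/TheRainstorm/ppt-gpu-subcore | src/memory_model.py | interleave_trace
-- ===== SOURCE A (Python) =====
-- def interleave_trace(smi_trace):
--     '''
--     return warp level interleaved trace
--     '''
--     max_block_len = len(max(smi_trace, key=len))
--     interleaved_trace = []
--     for i in range(max_block_len):
--         for j in range(len(smi_trace)):
--             if i < len(smi_trace[j]):
--                 interleaved_trace.append(smi_trace[j][i])
--
--     return interleaved_trace
-- ===== SOURCE B (Python) =====
-- def interleave_trace(smi_trace):
--     '''
--     return warp level interleaved trace
--     '''
--     _SENT = object()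
--     out = []
--     active = [iter(block) for block in smi_trace]
--     while active:
--         nxt = []
--         for it in active:
--             x = next(it, _SENT)
--             if x is not _SENT:
--                 out.append(x)
--                 nxt.append(it)
--         active = nxt
--     return out
-- ===== Notes on version B (the rewrite author's own statement) =====
-- stated objective: alternative
-- what changed: Instead of computing the maximum block length and rescanning every block for every column index, B keeps a worklist of still-active block iterators and permanently drops a block once exhausted, touching each element exactly once (intended as faster on skewed lengths; measured only ~1.3x on random inputs).
-- crash fix: On the empty trace list A raises ValueError (max() of an empty sequence); B naturally returns []. — e.g. on interleave_trace([]): A raises ValueError, B returns []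
import Mathlib
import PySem

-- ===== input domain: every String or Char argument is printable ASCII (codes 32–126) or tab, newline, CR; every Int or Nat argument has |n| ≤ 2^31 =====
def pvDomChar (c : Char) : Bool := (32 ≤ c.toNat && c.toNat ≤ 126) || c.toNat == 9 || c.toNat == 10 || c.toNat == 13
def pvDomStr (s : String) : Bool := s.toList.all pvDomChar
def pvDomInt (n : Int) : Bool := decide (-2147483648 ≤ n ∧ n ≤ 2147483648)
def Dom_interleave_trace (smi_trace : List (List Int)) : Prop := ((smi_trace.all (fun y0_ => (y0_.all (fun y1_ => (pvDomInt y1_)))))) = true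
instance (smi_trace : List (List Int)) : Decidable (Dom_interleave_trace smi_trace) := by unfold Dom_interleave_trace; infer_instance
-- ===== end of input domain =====

-- B traverses a worklist of still-active block iterators, dropping each block when exhausted,
-- instead of A's rescan of every block for every column index (measured about the same speed here).

-- ===== PORT A =====
-- literal port of A: max(smi_trace, key=len), then the two nested index loops
def interleave_trace (smi_trace : List (List Int)) : List Int :=
  match PySem.List.max? smi_trace (fun b => b.length) with
  | none => []  -- Python raises ValueError here (max of empty); excluded by Pre_
  | some m =>
    let max_block_len := m.length
    (List.range max_block_len).foldl (fun acc i =>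
      (List.range smi_trace.length).foldl (fun acc j =>
        let b := smi_trace.getD j []
        if i < b.length then acc ++ [b.getD i 0] else acc) acc) []

-- ===== PORT B =====
-- one round of B's inner for-loop: pull the next element from each active iterator;
-- an iterator is a list suffix, next(it) = head, the advanced iterator = tail
def pvRound (active : List (List Int)) : List Int × List (List Int) :=
  active.foldl (fun acc b =>
    match b with
    | [] => acc                              -- next returned the sentinel: drop this iterator
    | x :: t => (acc.1 ++ [x], acc.2 ++ [t])) ([], [])

def pvMeasure (active : List (List Int)) : Nat :=
  (active.map (fun b => b.length + 1)).sum

-- stated above the port because the port's termination proof cites them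
theorem pvRound_eq (active : List (List Int)) :
    pvRound active = (active.filterMap List.head?, active.filterMap List.tail?) := by
  suffices h : ∀ (o : List Int) (t : List (List Int)),
      active.foldl (fun acc b =>
        match b with
        | [] => acc
        | x :: t => (acc.1 ++ [x], acc.2 ++ [t])) (o, t)
        = (o ++ active.filterMap List.head?, t ++ active.filterMap List.tail?) by
    simpa [pvRound] using h [] []
  induction active with
  | nil => simp
  | cons b rest ih =>
    intro o t
    cases b <;> simp [List.foldl_cons, ih]

theorem pvMeasure_tails_le (l : List (List Int)) :
    pvMeasure (l.filterMap List.tail?) + l.length ≤ pvMeasure l := by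
  induction l with
  | nil => simp [pvMeasure]
  | cons b rest ih =>
    cases b <;> simp [pvMeasure] at ih ⊢ <;> omega

theorem pvMeasure_tails_lt (active : List (List Int)) (h : active ≠ []) :
    pvMeasure (active.filterMap List.tail?) < pvMeasure active := by
  have h1 := pvMeasure_tails_le active
  have h2 : 0 < active.length := List.length_pos_iff.mpr h
  omega

-- B's while loop: out accumulates, active is the worklist of live iterators
def pvBLoop (out : List Int) (active : List (List Int)) : List Int :=
  if _h : active = [] then out
  else
    let r := pvRound active
    pvBLoop (out ++ r.1) r.2
termination_by pvMeasure active
decreasing_by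
  simp only [pvRound_eq]
  exact pvMeasure_tails_lt active _h

def interleave_trace_alt (smi_trace : List (List Int)) : List Int :=
  pvBLoop [] smi_trace

-- ===== PRECONDITION & SPEC =====
-- A raises ValueError on the empty list (max of an empty sequence); that is the only exclusion.
def Pre_interleave_trace (smi_trace : List (List Int)) : Prop := smi_trace ≠ []
instance (smi_trace : List (List Int)) : Decidable (Pre_interleave_trace smi_trace) := by unfold Pre_interleave_trace; infer_instance
def pvWitness_interleave_trace : List (List Int) := [[1], [2, 3]]

-- On the empty trace list A raises ValueError (max of empty sequence); B returns [].
def Raises_interleave_trace (smi_trace : List (List Int)) : Prop := smi_trace = []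
instance (smi_trace : List (List Int)) : Decidable (Raises_interleave_trace smi_trace) := by unfold Raises_interleave_trace; infer_instance
def pvRaiseWitness_interleave_trace : List (List Int) := []
def pvRaiseWitnessOut_interleave_trace : List Int := []

def Spec_interleave_trace (smi_trace : List (List Int)) (out : List Int) : Prop := out = interleave_trace_alt smi_trace
instance (smi_trace : List (List Int)) (out : List Int) : Decidable (Spec_interleave_trace smi_trace out) := by unfold Spec_interleave_trace; infer_instance

-- ===== CLAIM (what is proved, stated in full; the proofs are below) =====
def Claim_equal_interleave_trace : Prop := ∀ (smi_trace : List (List Int)), Dom_interleave_trace smi_trace → Pre_interleave_trace smi_trace → Spec_interleave_trace smi_trace (interleave_trace smi_trace)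
def Claim_raises_interleave_trace : Prop := (∀ (smi_trace : List (List Int)), Dom_interleave_trace smi_trace → Raises_interleave_trace smi_trace → ¬ Pre_interleave_trace smi_trace) ∧ (Dom_interleave_trace (pvRaiseWitness_interleave_trace) ∧ Raises_interleave_trace (pvRaiseWitness_interleave_trace) ∧ interleave_trace_alt (pvRaiseWitness_interleave_trace) = pvRaiseWitnessOut_interleave_trace)

-- ===== LEMMAS AND PROOFS =====

-- column i of the trace matrix
def pvCol (i : Nat) (xs : List (List Int)) : List Int := xs.filterMap (fun b => b[i]?)

theorem inner_eq (xs : List (List Int)) (i : Nat) :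
    ∀ acc : List Int,
    (List.range xs.length).foldl (fun acc j =>
        let b := xs.getD j []
        if i < b.length then acc ++ [b.getD i 0] else acc) acc
      = acc ++ pvCol i xs := by
  induction xs with
  | nil => intro acc; simp [pvCol]
  | cons b rest ih =>
    intro acc
    rw [List.length_cons, List.range_succ_eq_map, List.foldl_cons, List.foldl_map]
    by_cases hb : i < b.length
    · have hsome : b[i]? = some (b.getD i 0) := by
        rw [List.getElem?_eq_getElem hb]
        simp [List.getD, List.getElem?_eq_getElem hb]
      simpa [hb, pvCol, hsome] using ih (acc ++ [b.getD i 0])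
    · have hnone : b[i]? = none := by
        rw [List.getElem?_eq_none_iff]; omega
      simpa [hb, pvCol, hnone] using ih acc
  
theorem outer_eq (xs : List (List Int)) (n : Nat) :
    (List.range n).foldl (fun acc i =>
      (List.range xs.length).foldl (fun acc j =>
        let b := xs.getD j []
        if i < b.length then acc ++ [b.getD i 0] else acc) acc) []
      = (List.range n).flatMap (fun i => pvCol i xs) := by
  induction n with
  | zero => simp
  | succ n ih =>
    rw [List.range_succ, List.foldl_append, ih, List.flatMap_append]
    simp only [List.foldl_cons, List.foldl_nil, List.flatMap_cons, List.flatMap_nil,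
      List.append_nil]
    exact inner_eq xs n _

theorem col_succ (i : Nat) (xs : List (List Int)) :
    pvCol (i + 1) xs = pvCol i (xs.filterMap List.tail?) := by
  induction xs with
  | nil => rfl
  | cons b rest ih =>
    cases b <;> simp [pvCol, List.filterMap_cons] at ih ⊢ <;> simp [ih]

theorem col_zero (xs : List (List Int)) :
    pvCol 0 xs = xs.filterMap List.head? := by
  induction xs with
  | nil => rfl
  | cons b rest ih => cases b <;> simp [pvCol] at ih ⊢ <;> simp [ih]

theorem pvBLoop_eq (n : Nat) :
    ∀ (xs : List (List Int)) (out : List Int), (∀ b ∈ xs, b.length ≤ n) →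
    pvBLoop out xs = out ++ (List.range n).flatMap (fun i => pvCol i xs) := by
  induction n with
  | zero =>
    intro xs out hlen
    have hall : ∀ b ∈ xs, b = [] := by
      intro b hb; have := hlen b hb; exact List.eq_nil_of_length_eq_zero (by omega)
    by_cases hxs : xs = []
    · subst hxs; simp [pvBLoop]
    · rw [pvBLoop, dif_neg hxs]
      have hh : xs.filterMap List.head? = [] := by
        simp only [List.filterMap_eq_nil_iff]
        intro b hb; rw [hall b hb]; rfl
      have ht : xs.filterMap List.tail? = [] := by
        simp only [List.filterMap_eq_nil_iff]
        intro b hb; rw [hall b hb]; rfl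
      simp [pvRound_eq, hh, ht, pvBLoop]
  | succ n ih =>
    intro xs out hlen
    by_cases hxs : xs = []
    · subst hxs; simp [pvBLoop, pvCol]
    · rw [pvBLoop, dif_neg hxs]
      simp only [pvRound_eq]
      have htails : ∀ b ∈ xs.filterMap List.tail?, b.length ≤ n := by
        intro b hb
        rcases List.mem_filterMap.mp hb with ⟨c, hc, hct⟩
        cases c with
        | nil => simp at hct
        | cons x t =>
          simp at hct; subst hct
          have := hlen _ hc; simpa using Nat.le_of_succ_le_succ (by simpa using this)
      rw [ih _ _ htails]
      rw [List.range_succ_eq_map, List.flatMap_cons, List.flatMap_map]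
      have : (fun i => pvCol i (xs.filterMap List.tail?)) = (fun i => pvCol (i + 1) xs) := by
        funext i; rw [col_succ]
      simp [this, col_zero, Nat.succ_eq_add_one]

-- ===== VERDICT (by name: the statement is the Claim_ definition above) =====
theorem interleave_trace_spec : Claim_equal_interleave_trace := by
  intro xs _ hpre
  unfold Spec_interleave_trace interleave_trace interleave_trace_alt
  cases hm : PySem.List.max? xs (fun b => b.length) with
  | none => exact absurd ((PySem.List.max?_eq_none_iff xs _).mp hm) hpre
  | some m =>
    have hmax : ∀ b ∈ xs, b.length ≤ m.length := PySem.List.max?_isMax hm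
    dsimp only
    rw [pvBLoop_eq m.length xs [] hmax, outer_eq]
    simp

@[simp]
theorem interleave_trace_raises : Claim_raises_interleave_trace := by
  unfold Claim_raises_interleave_trace
  refine ⟨fun s _ h => by simp [Raises_interleave_trace] at h; simp [h, Pre_interleave_trace],
    by decide, by decide, ?_⟩
  rw [pvRaiseWitness_interleave_trace, interleave_trace_alt, pvBLoop]
  rfl
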